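-- pv_equiv track=rewrite | github.com/DaveCBeck/thala | workflows/wrappers/supervised_lit_review/supervision/utils/paragraph_numbering.py | number_paragraphs
-- ===== SOURCE A (Python) =====
-- def number_paragraphs(doc: str) -> tuple[str, dict[int, str]]:
--     """Add [P1], [P2] markers to each paragraph for structural editing.
--
--     Paragraphs are separated by double newlines or markdown headers.
--     Preserves markdown structure (headers, code blocks, lists).
--
--     Returns:
--         Tuple of (numbered_doc, paragraph_mapping) where mapping is {num: original_text}
--     """
--     lines = doc.split("\n")
--     numbered_lines = []
--     paragraph_mapping = {}
--     paragraph_num = 1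
--     in_code_block = False
--     current_paragraph_lines = []
--
--     for line in lines:
--         # Track code block boundaries
--         if line.strip().startswith("```"):
--             in_code_block = not in_code_block
--
--         # Headers always start a new paragraph
--         is_header = line.strip().startswith("#")
--
--         # Empty line indicates paragraph boundary
--         is_empty = line.strip() == ""
--
--         if is_empty and not in_code_block and current_paragraph_lines:
--             # End current paragraph
--             paragraph_text = "\n".join(current_paragraph_lines)
--             paragraph_mapping[paragraph_num] = paragraph_text
--             numbered_lines.append(f"[P{paragraph_num}] {paragraph_text}")
--             numbered_lines.append("")  # Preserve empty line
--             paragraph_num += 1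
--             current_paragraph_lines = []
--         elif is_header and not in_code_block:
--             # Headers are standalone paragraphs
--             if current_paragraph_lines:
--                 paragraph_text = "\n".join(current_paragraph_lines)
--                 paragraph_mapping[paragraph_num] = paragraph_text
--                 numbered_lines.append(f"[P{paragraph_num}] {paragraph_text}")
--                 paragraph_num += 1
--                 current_paragraph_lines = []
--
--             paragraph_mapping[paragraph_num] = line
--             numbered_lines.append(f"[P{paragraph_num}] {line}")
--             paragraph_num += 1
--         elif is_empty:
--             numbered_lines.append(line)
--         else:
--             current_paragraph_lines.append(line)
--
--     # Handle final paragraph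
--     if current_paragraph_lines:
--         paragraph_text = "\n".join(current_paragraph_lines)
--         paragraph_mapping[paragraph_num] = paragraph_text
--         numbered_lines.append(f"[P{paragraph_num}] {paragraph_text}")
--
--     return "\n".join(numbered_lines), paragraph_mapping
-- ===== SOURCE B (Python) =====
-- def number_paragraphs(doc: str) -> tuple[str, dict[int, str]]:
--     """Two-pass variant: tokenize into (numbered?, text) tokens, then number them."""
--     tokens = []
--     buf = []
--     in_code = False
--     for line in doc.split("\n"):
--         s = line.strip()
--         if s.startswith("```"):
--             in_code = not in_code
--         if s == "" and not in_code and buf: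
--             tokens.append((True, "\n".join(buf)))
--             tokens.append((False, ""))
--             buf = []
--         elif s.startswith("#") and not in_code:
--             if buf:
--                 tokens.append((True, "\n".join(buf)))
--                 buf = []
--             tokens.append((True, line))
--         elif s == "":
--             tokens.append((False, line))
--         else:
--             buf.append(line)
--     if buf:
--         tokens.append((True, "\n".join(buf)))
--
--     out_lines = []
--     mapping = {}
--     num = 1
--     for numbered, text in tokens:
--         if numbered:
--             mapping[num] = text
--             out_lines.append(f"[P{num}] {text}")
--             num += 1
--         else:
--             out_lines.append(text)
--     return "\n".join(out_lines), mapping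
-- ===== Notes on version B (the rewrite author's own statement) =====
-- stated objective: simpler
-- what changed: Replaces A's single loop that interleaves numbering, mapping insertion and output building across five mutable variables with two plain passes: tokenize lines into (numbered?, text) tokens, then number the tokens sequentially.
import Mathlib
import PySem

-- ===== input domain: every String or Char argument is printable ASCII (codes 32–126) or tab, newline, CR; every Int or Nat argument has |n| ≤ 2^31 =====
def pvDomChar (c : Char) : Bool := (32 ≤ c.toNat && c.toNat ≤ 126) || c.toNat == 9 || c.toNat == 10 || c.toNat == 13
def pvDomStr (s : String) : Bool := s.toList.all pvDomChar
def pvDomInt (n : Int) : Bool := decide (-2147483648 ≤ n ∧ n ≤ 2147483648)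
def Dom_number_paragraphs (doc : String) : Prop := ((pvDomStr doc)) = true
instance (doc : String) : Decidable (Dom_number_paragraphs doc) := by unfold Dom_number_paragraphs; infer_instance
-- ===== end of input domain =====

-- B replaces A's single loop over five pieces of mutable state by two passes — tokenize
-- into (numbered?, text) tokens, then number the tokens — for a plainer decomposition.

-- ===== PORT A =====
-- A's for-loop as structural recursion over the same state; the nil case performs the
-- post-loop final flush.
def npLoopA : List String → List String → PySem.Dict Int String → Int → Bool → List String →
    List String × PySem.Dict Int String
  | [], nl, pm, n, _, cur =>
    if cur.isEmpty then (nl, pm)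
    else
      let t := PySem.Str.join "\n" cur
      (nl ++ ["[P" ++ PySem.Int.toStr n ++ "] " ++ t], pm.insert n t)
  | line :: rest, nl, pm, n, code, cur =>
    let code := if PySem.Str.startswith (PySem.Str.strip line) "```" then !code else code
    let isHeader := PySem.Str.startswith (PySem.Str.strip line) "#"
    let isEmpty := PySem.Str.strip line == ""
    if isEmpty && !code && !cur.isEmpty then
      let t := PySem.Str.join "\n" cur
      npLoopA rest (nl ++ ["[P" ++ PySem.Int.toStr n ++ "] " ++ t, ""]) (pm.insert n t) (n + 1) code []
    else if isHeader && !code then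
      if cur.isEmpty then
        npLoopA rest (nl ++ ["[P" ++ PySem.Int.toStr n ++ "] " ++ line]) (pm.insert n line) (n + 1) code cur
      else
        let t := PySem.Str.join "\n" cur
        npLoopA rest (nl ++ ["[P" ++ PySem.Int.toStr n ++ "] " ++ t,
                             "[P" ++ PySem.Int.toStr (n + 1) ++ "] " ++ line])
          ((pm.insert n t).insert (n + 1) line) (n + 1 + 1) code []
    else if isEmpty then
      npLoopA rest (nl ++ [line]) pm n code cur
    else
      npLoopA rest nl pm n code (cur ++ [line])

def number_paragraphs (doc : String) : String × (List (Int × String)) :=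
  let st := npLoopA ((PySem.Str.split? doc "\n").getD []) [] PySem.Dict.empty 1 false []
  (PySem.Str.join "\n" st.1, st.2.items)

-- ===== PORT B =====
-- pass 1: tokenize into (numbered?, text) tokens (accumulator = the tokens list)
def npTok : List String → Bool → List String → List (Bool × String) → List (Bool × String)
  | [], _, buf, toks =>
    if buf.isEmpty then toks else toks ++ [(true, PySem.Str.join "\n" buf)]
  | line :: rest, code, buf, toks =>
    let s := PySem.Str.strip line
    let code := if PySem.Str.startswith s "```" then !code else code
    if s == "" && !code && !buf.isEmpty then
      npTok rest code [] (toks ++ [(true, PySem.Str.join "\n" buf), (false, "")])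
    else if PySem.Str.startswith s "#" && !code then
      if buf.isEmpty then npTok rest code buf (toks ++ [(true, line)])
      else npTok rest code [] (toks ++ [(true, PySem.Str.join "\n" buf), (true, line)])
    else if s == "" then
      npTok rest code buf (toks ++ [(false, line)])
    else
      npTok rest code (buf ++ [line]) toks

-- pass 2: number the tokens
def npRender : List (Bool × String) → List String → PySem.Dict Int String → Int →
    List String × PySem.Dict Int String
  | [], nl, pm, _ => (nl, pm)
  | (numbered, text) :: rest, nl, pm, n =>
    if numbered then
      npRender rest (nl ++ ["[P" ++ PySem.Int.toStr n ++ "] " ++ text]) (pm.insert n text) (n + 1)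
    else
      npRender rest (nl ++ [text]) pm n

def number_paragraphs_alt (doc : String) : String × (List (Int × String)) :=
  let toks := npTok ((PySem.Str.split? doc "\n").getD []) false [] []
  let st := npRender toks [] PySem.Dict.empty 1
  (PySem.Str.join "\n" st.1, st.2.items)

-- ===== PRECONDITION & SPEC =====
def Spec_number_paragraphs (doc : String) (out : String × (List (Int × String))) : Prop := out = number_paragraphs_alt doc
instance (doc : String) (out : String × (List (Int × String))) : Decidable (Spec_number_paragraphs doc out) := by unfold Spec_number_paragraphs; infer_instance

-- ===== CLAIM (what is proved, stated in full; the proofs are below) =====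
def Claim_equal_number_paragraphs : Prop := ∀ (doc : String), Dom_number_paragraphs doc → Spec_number_paragraphs doc (number_paragraphs doc)

-- ===== LEMMAS AND PROOFS =====

-- pulling the accumulator out of npTok
theorem npTok_acc : ∀ (ls : List String) (code : Bool) (buf : List String)
    (toks : List (Bool × String)), npTok ls code buf toks = toks ++ npTok ls code buf [] := by
  intro ls
  induction ls with
  | nil =>
    intro code buf toks
    simp only [npTok]
    split <;> simp
  | cons line rest ih =>
    intro code buf toks
    simp only [npTok]
    simp only [List.nil_append]
    split_ifs <;> (rw [ih]; try conv_rhs => rw [ih]) <;> try simp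

-- the main invariant: A's loop from any state equals rendering B's remaining token stream
theorem npMain : ∀ (ls : List String) (nl : List String) (pm : PySem.Dict Int String)
    (n : Int) (code : Bool) (cur : List String),
    npLoopA ls nl pm n code cur = npRender (npTok ls code cur []) nl pm n := by
  intro ls
  induction ls with
  | nil =>
    intro nl pm n code cur
    simp only [npLoopA, npTok]
    split <;> simp [npRender]
  | cons line rest ih =>
    intro nl pm n code cur
    simp only [npLoopA, npTok]
    split_ifs <;> rw [npTok_acc] <;> simp [npRender, ih]

-- ===== VERDICT (by name: the statement is the Claim_ definition above) =====
theorem number_paragraphs_spec : Claim_equal_number_paragraphs := by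
  intro doc _
  unfold Spec_number_paragraphs number_paragraphs number_paragraphs_alt
  rw [npMain]
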